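-- pv_equiv track=rewrite | github.com/paras-a/Data-Structures-and-Algorithms | Arrays/arrays.py | segregate_even_odd
-- ===== SOURCE A (Python) =====
-- def segregate_even_odd(arr):
--     """
--     Segregate even and odd numbers, maintaining relative order within each group.
--
--     @param arr: List[int] -- Array of integers
--     @return: List[int] -- Array with evens followed by odds
--     @example:
--         >>> segregate_even_odd([1, 2, 3, 4, 6])
--         [2, 4, 6, 1, 3]
--         >>> segregate_even_odd([1, 3, 5])
--         [1, 3, 5]
--         >>> segregate_even_odd([])
--         []
--         >>> segregate_even_odd([2, 4, 6])
--         [2, 4, 6]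
--         >>> segregate_even_odd([1, 1, 2, 2])
--         [2, 2, 1, 1]
--     """
--     odds = []
--     evens = []
--     for i in range(len(arr)):
--         if arr[i] % 2 == 0:
--             evens.append(arr[i])
--     for i in range(len(arr)):
--         if arr[i] % 2 != 0:
--             odds.append(arr[i])
--     return evens + odds
-- ===== SOURCE B (Python) =====
-- def segregate_even_odd(arr):
--     return sorted(arr, key=lambda x: x % 2)
-- ===== Notes on version B (the rewrite author's own statement) =====
-- stated objective: idiomatic
-- what changed: Replaced the two filtering passes and list concatenation with a single stable key-sort, sorted(arr, key=lambda x: x % 2), whose stability yields evens-then-odds in original relative order.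
import Mathlib
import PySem

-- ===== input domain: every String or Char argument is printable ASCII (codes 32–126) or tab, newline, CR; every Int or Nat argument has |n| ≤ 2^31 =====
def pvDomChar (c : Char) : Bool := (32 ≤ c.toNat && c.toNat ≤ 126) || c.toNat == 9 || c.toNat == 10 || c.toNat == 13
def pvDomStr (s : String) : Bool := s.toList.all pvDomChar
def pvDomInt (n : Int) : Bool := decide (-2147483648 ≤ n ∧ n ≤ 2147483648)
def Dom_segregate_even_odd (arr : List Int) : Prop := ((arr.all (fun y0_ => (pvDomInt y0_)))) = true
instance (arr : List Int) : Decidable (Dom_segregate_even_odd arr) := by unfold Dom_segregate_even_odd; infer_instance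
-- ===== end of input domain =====

-- B replaces A's two filtering passes by one stable key-sort (sorted with key x % 2); idiomatic, not faster.

-- ===== PORT A =====
def segregate_even_odd (arr : List Int) : List Int :=
  let evens : List Int :=
    (PySem.List.pyRange 0 (PySem.List.len arr)).foldl
      (fun evens i =>
        if PySem.Int.mod (PySem.List.pyGetD arr i 0) 2 == 0 then
          evens ++ [PySem.List.pyGetD arr i 0]
        else evens) []
  let odds : List Int :=
    (PySem.List.pyRange 0 (PySem.List.len arr)).foldl
      (fun odds i =>
        if !(PySem.Int.mod (PySem.List.pyGetD arr i 0) 2 == 0) then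
          odds ++ [PySem.List.pyGetD arr i 0]
        else odds) []
  evens ++ odds

-- ===== PORT B =====
def segregate_even_odd_alt (arr : List Int) : List Int :=
  PySem.List.sorted arr (fun x => PySem.Int.mod x 2)

-- ===== PRECONDITION & SPEC =====
def Spec_segregate_even_odd (arr : List Int) (out : List Int) : Prop := out = segregate_even_odd_alt arr
instance (arr : List Int) (out : List Int) : Decidable (Spec_segregate_even_odd arr out) := by unfold Spec_segregate_even_odd; infer_instance

-- ===== CLAIM (what is proved, stated in full; the proofs are below) =====
def Claim_equal_segregate_even_odd : Prop := ∀ (arr : List Int), Dom_segregate_even_odd arr → Spec_segregate_even_odd arr (segregate_even_odd arr)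

-- ===== LEMMAS AND PROOFS =====

-- x % 2 with positive divisor is 0 or 1
lemma mod2_cases (x : Int) : PySem.Int.mod x 2 = 0 ∨ PySem.Int.mod x 2 = 1 := by
  have h1 := PySem.Int.mod_nonneg x (b := 2) (by norm_num)
  have h2 := PySem.Int.mod_lt x (b := 2) (by norm_num)
  omega

-- inserting x into an evens-then-odds accumulator keeps that shape (the stability step)
lemma insertBy_evens_odds (x : Int) (E O : List Int)
    (hE : ∀ y ∈ E, PySem.Int.mod y 2 = 0) (hO : ∀ y ∈ O, PySem.Int.mod y 2 = 1) :
    PySem.List.insertBy (fun a b => decide (PySem.Int.mod a 2 < PySem.Int.mod b 2)) x (E ++ O) =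
      if PySem.Int.mod x 2 = 0 then E ++ [x] ++ O else (E ++ O) ++ [x] := by
  by_cases hx : PySem.Int.mod x 2 = 0
  · rw [if_pos hx]
    induction E with
    | nil =>
      cases O with
      | nil => rfl
      | cons z O' =>
        have hz := hO z (List.mem_cons_self)
        simp only [List.nil_append, PySem.List.insertBy, hx, hz]
        rw [if_pos (by decide)]
        rfl
    | cons a E ih =>
      have ha := hE a (List.mem_cons_self)
      have hih := ih (fun y hy => hE y (List.mem_cons_of_mem _ hy))
      simp only [List.cons_append, PySem.List.insertBy, hx, ha]
      rw [if_neg (by decide)]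
      rw [hih]
  · have hx1 : PySem.Int.mod x 2 = 1 := (mod2_cases x).resolve_left hx
    rw [if_neg hx]
    apply PySem.List.insertBy_of_forall_not_before
    intro y hy
    rcases List.mem_append.mp hy with h | h
    · simp only [hE y h, hx1]
      decide
    · simp only [hO y h, hx1]
      decide

-- stable sort by x % 2 is exactly: evens (in order) then odds (in order)
lemma sorted_mod2_eq (arr : List Int) :
    PySem.List.sorted arr (fun x => PySem.Int.mod x 2) =
      arr.filter (fun x => PySem.Int.mod x 2 == 0) ++
      arr.filter (fun x => !(PySem.Int.mod x 2 == 0)) := by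
  rw [PySem.List.sorted_eq_foldl_insertBy]
  induction arr using List.reverseRecOn with
  | nil => simp
  | append_singleton arr x ih =>
    rw [List.foldl_append, List.foldl_cons, List.foldl_nil, ih]
    rw [insertBy_evens_odds x _ _
      (fun y hy => by simpa using (List.mem_filter.mp hy).2)
      (fun y hy => by
        have := (List.mem_filter.mp hy).2
        simp only [Bool.not_eq_eq_eq_not, Bool.not_true, beq_eq_false_iff_ne, ne_eq] at this
        exact (mod2_cases y).resolve_left this)]
    have h1 : List.filter (fun x => PySem.Int.mod x 2 == 0) [x] =
        if PySem.Int.mod x 2 = 0 then [x] else [] := by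
      by_cases hx : PySem.Int.mod x 2 = 0
      · rw [if_pos hx]; simp only [List.filter_cons, List.filter_nil, hx]; rfl
      · have hx1 := (mod2_cases x).resolve_left hx
        rw [if_neg hx]; simp only [List.filter_cons, List.filter_nil, hx1]; rfl
    have h2 : List.filter (fun x => !(PySem.Int.mod x 2 == 0)) [x] =
        if PySem.Int.mod x 2 = 0 then [] else [x] := by
      by_cases hx : PySem.Int.mod x 2 = 0
      · rw [if_pos hx]; simp only [List.filter_cons, List.filter_nil, hx]; rfl
      · have hx1 := (mod2_cases x).resolve_left hx
        rw [if_neg hx]; simp only [List.filter_cons, List.filter_nil, hx1]; rfl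
    rw [List.filter_append, List.filter_append, h1, h2]
    by_cases hx : PySem.Int.mod x 2 = 0
    · rw [if_pos hx, if_pos hx, if_pos hx]
      simp
    · rw [if_neg hx, if_neg hx, if_neg hx]
      simp

theorem segregate_even_odd_eq_filters (arr : List Int) :
    segregate_even_odd arr =
      arr.filter (fun x => PySem.Int.mod x 2 == 0) ++
      arr.filter (fun x => !(PySem.Int.mod x 2 == 0)) := by
  unfold segregate_even_odd
  have he := PySem.List.foldl_pyRange_pyGetD arr 0
    (fun acc x => if PySem.Int.mod x 2 == 0 then acc ++ [x] else acc) [] (a := 0) le_rfl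
  have ho := PySem.List.foldl_pyRange_pyGetD arr 0
    (fun acc x => if !(PySem.Int.mod x 2 == 0) then acc ++ [x] else acc) [] (a := 0) le_rfl
  simp only [Int.toNat_zero, List.drop_zero] at he ho
  rw [he, ho]
  rw [show (fun (acc : List Int) (x : Int) => if PySem.Int.mod x 2 == 0 then acc ++ [x] else acc) =
        (fun acc x => if (fun x => PySem.Int.mod x 2 == 0) x = true then acc ++ [id x] else acc) by rfl,
      PySem.List.foldl_append_if]
  rw [show (fun (acc : List Int) (x : Int) => if !(PySem.Int.mod x 2 == 0) then acc ++ [x] else acc) =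
        (fun acc x => if (fun x => !(PySem.Int.mod x 2 == 0)) x = true then acc ++ [id x] else acc) by rfl,
      PySem.List.foldl_append_if]
  simp [List.map_id]

-- ===== VERDICT (by name: the statement is the Claim_ definition above) =====
theorem segregate_even_odd_spec : Claim_equal_segregate_even_odd := by
  intro arr _
  unfold Spec_segregate_even_odd segregate_even_odd_alt
  rw [segregate_even_odd_eq_filters, sorted_mod2_eq]
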